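-- pv_equiv track=rewrite | github.com/educorvi/edi.jsonforms | src/edi/jsonforms/views/pydantic_models/dependency_handler.py | _order_values
-- ===== SOURCE A (Python) =====
-- def _order_values(values, order_map):
--     deduped = []
--     seen = set()
--     for idx, value in enumerate(values):
--         if value in seen:
--             continue
--         seen.add(value)
--         deduped.append((value, idx))
--     if not order_map:
--         return [value for value, _ in deduped]
--     deduped.sort(key=lambda item: (order_map.get(item[0], len(order_map)), item[1]))
--     return [value for value, _ in deduped]
-- ===== SOURCE B (Python) =====
-- def _order_values(values, order_map):
--     deduped = []
--     seen = set()
--     for v in values: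
--         if v not in seen:
--             seen.add(v)
--             deduped.append(v)
--     if not order_map:
--         return deduped
--     default = len(order_map)
--     buckets = {}
--     for v in deduped:
--         buckets.setdefault(order_map.get(v, default), []).append(v)
--     out = []
--     for r in sorted(buckets):
--         out.extend(buckets[r])
--     return out
-- ===== Notes on version B (the rewrite author's own statement) =====
-- stated objective: alternative
-- what changed: Replaces the comparison sort of (value, index) pairs by a single grouping pass into rank buckets (dict of rank -> values in first-occurrence order) followed by sorting only the distinct ranks and concatenating the buckets; dedup keeps plain values instead of pairs.
import Mathlib
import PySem

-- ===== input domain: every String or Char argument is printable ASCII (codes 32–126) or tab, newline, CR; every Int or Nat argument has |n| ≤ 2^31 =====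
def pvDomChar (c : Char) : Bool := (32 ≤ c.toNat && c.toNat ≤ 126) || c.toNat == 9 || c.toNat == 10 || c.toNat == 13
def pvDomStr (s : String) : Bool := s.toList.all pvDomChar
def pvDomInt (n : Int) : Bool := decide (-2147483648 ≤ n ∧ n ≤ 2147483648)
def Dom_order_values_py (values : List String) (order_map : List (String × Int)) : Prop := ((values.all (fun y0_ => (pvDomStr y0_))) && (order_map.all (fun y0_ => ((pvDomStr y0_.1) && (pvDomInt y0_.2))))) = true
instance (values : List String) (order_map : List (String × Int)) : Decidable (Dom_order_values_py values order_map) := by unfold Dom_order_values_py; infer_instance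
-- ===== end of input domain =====

-- B replaces A's comparison sort of (value, index) pairs by one grouping pass into
-- rank buckets followed by sorting only the distinct ranks (objective: alternative).

-- ===== PORT A =====
def order_values_py (values : List String) (order_map : List (String × Int)) : List String :=
  let om := PySem.Dict.ofList order_map
  let st := (PySem.List.enumerate values).foldl
      (fun (st : List (String × Int) × PySem.Set String) p =>
        if PySem.Set.contains st.2 p.2 then st
        else (st.1 ++ [(p.2, p.1)], PySem.Set.add st.2 p.2))
      ([], PySem.Set.empty)
  if order_map.isEmpty then st.1.map (fun it => it.1)
  else
    (PySem.List.sorted2 st.1 (fun it => om.getD it.1 (om.size : Int)) (fun it => it.2)).map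
      (fun it => it.1)

-- ===== PORT B =====
def order_values_py_alt (values : List String) (order_map : List (String × Int)) : List String :=
  let deduped := values.foldl PySem.Set.add PySem.Set.empty
  if order_map.isEmpty then deduped
  else
    let om := PySem.Dict.ofList order_map
    let dflt : Int := (om.size : Int)
    let buckets := deduped.foldl
        (fun (b : PySem.Dict Int (List String)) v =>
          b.modify (om.getD v dflt) [] (fun cur => cur ++ [v]))
        PySem.Dict.empty
    (PySem.List.sorted buckets.keys (fun r => r)).foldl
      (fun out r => out ++ buckets.getD r []) []

-- ===== PRECONDITION & SPEC =====
def Spec_order_values_py (values : List String) (order_map : List (String × Int)) (out : List String) : Prop := out = order_values_py_alt values order_map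
instance (values : List String) (order_map : List (String × Int)) (out : List String) : Decidable (Spec_order_values_py values order_map out) := by unfold Spec_order_values_py; infer_instance

-- ===== CLAIM (what is proved, stated in full; the proofs are below) =====
def Claim_equal_order_values_py : Prop := ∀ (values : List String) (order_map : List (String × Int)), Dom_order_values_py values order_map → Spec_order_values_py values order_map (order_values_py values order_map)


-- ===== LEMMAS AND PROOFS =====

-- A's dedup loop body, named for the proofs (definitionally the lambda in the port)
def stepA (st : List (String × Int) × PySem.Set String) (p : Int × String) :
    List (String × Int) × PySem.Set String :=
  if PySem.Set.contains st.2 p.2 then st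
  else (st.1 ++ [(p.2, p.1)], PySem.Set.add st.2 p.2)

theorem stepA_mem {acc : List (String × Int)} {s : Int} {v : String}
    (hc : PySem.Set.contains (acc.map Prod.fst) v = true) :
    stepA (acc, acc.map Prod.fst) (s, v) = (acc, acc.map Prod.fst) := by
  simp only [stepA, hc, if_true]

theorem stepA_new {acc : List (String × Int)} {s : Int} {v : String}
    (hc : PySem.Set.contains (acc.map Prod.fst) v = false) :
    stepA (acc, acc.map Prod.fst) (s, v)
      = (acc ++ [(v, s)], (acc ++ [(v, s)]).map Prod.fst) := by
  simp only [stepA, hc, Bool.false_eq_true, if_false, PySem.Set.add, List.map_append,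
    List.map_cons, List.map_nil]

theorem setAdd_mem {acc : List (String × Int)} {v : String}
    (hc : PySem.Set.contains (acc.map Prod.fst) v = true) :
    PySem.Set.add (acc.map Prod.fst) v = acc.map Prod.fst := by
  simp only [PySem.Set.add, hc, if_true]

theorem setAdd_new {acc : List (String × Int)} {s : Int} {v : String}
    (hc : PySem.Set.contains (acc.map Prod.fst) v = false) :
    PySem.Set.add (acc.map Prod.fst) v = (acc ++ [(v, s)]).map Prod.fst := by
  simp only [PySem.Set.add, hc, Bool.false_eq_true, if_false, List.map_append,
    List.map_cons, List.map_nil]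

-- the Boolean comparison sorted2 uses: strict lexicographic order on (k1, k2)
def lexB {α : Type} (k1 k2 : α → Int) (a b : α) : Bool :=
  decide (k1 a < k1 b) || (!decide (k1 b < k1 a) && decide (k2 a < k2 b))

theorem lexB_asymm {α : Type} (k1 k2 : α → Int) {a b : α}
    (h : lexB k1 k2 a b = true) : lexB k1 k2 b a = false := by
  simp [lexB] at *; omega

theorem lexB_trans_false {α : Type} (k1 k2 : α → Int) {x y z : α}
    (h1 : lexB k1 k2 x y = true) (h2 : lexB k1 k2 z y = false) :
    lexB k1 k2 z x = false := by
  simp [lexB] at *; omega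

theorem insertBy_lexB_pairwise {α : Type} (k1 k2 : α → Int) (x : α) (ys : List α)
    (h : ys.Pairwise (fun a b => lexB k1 k2 b a = false)) :
    (PySem.List.insertBy (lexB k1 k2) x ys).Pairwise (fun a b => lexB k1 k2 b a = false) := by
  induction ys with
  | nil => simp [PySem.List.insertBy]
  | cons y t ih =>
    rcases List.pairwise_cons.mp h with ⟨hy, ht⟩
    rw [PySem.List.insertBy.eq_2]
    by_cases hb : lexB k1 k2 x y = true
    · rw [if_pos hb]
      refine List.pairwise_cons.mpr ⟨?_, h⟩
      intro z hz
      rcases List.mem_cons.mp hz with rfl | hzt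
      · exact lexB_asymm k1 k2 hb
      · exact lexB_trans_false k1 k2 hb (hy z hzt)
    · rw [if_neg hb]
      refine List.pairwise_cons.mpr ⟨?_, ih ht⟩
      intro z hz
      rcases (PySem.List.mem_insertBy _ _ _ _).mp hz with rfl | hzt
      · exact Bool.eq_false_iff.mpr hb
      · exact hy z hzt

theorem foldl_insertBy_lexB_pairwise {α : Type} (k1 k2 : α → Int) (xs : List α) :
    ∀ acc : List α, acc.Pairwise (fun a b => lexB k1 k2 b a = false) →
    (xs.foldl (fun acc x => PySem.List.insertBy (lexB k1 k2) x acc) acc).Pairwise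
      (fun a b => lexB k1 k2 b a = false) := by
  induction xs with
  | nil => intro acc h; exact h
  | cons x t ih =>
    intro acc h
    exact ih _ (insertBy_lexB_pairwise k1 k2 x acc h)

-- characterisation of sorted2: any strictly lex-increasing rearrangement is the result
theorem sorted2_eq_of_perm {α : Type} (k1 k2 : α → Int) (xs ys : List α)
    (hinj : ∀ a ∈ xs, ∀ b ∈ xs, k1 a = k1 b → k2 a = k2 b → a = b)
    (hperm : ys.Perm xs)
    (hp : ys.Pairwise (fun a b => lexB k1 k2 a b = true)) :
    PySem.List.sorted2 xs k1 k2 = ys := by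
  have hL : PySem.List.sorted2 xs k1 k2
      = xs.foldl (fun acc x => PySem.List.insertBy (lexB k1 k2) x acc) [] := rfl
  rw [hL]
  have hLperm : (xs.foldl (fun acc x => PySem.List.insertBy (lexB k1 k2) x acc) []).Perm xs := by
    simpa using PySem.List.foldl_insertBy_perm (lexB k1 k2) xs []
  refine List.Perm.eq_of_pairwise (le := fun a b => lexB k1 k2 b a = false) ?_ ?_ ?_
    (hLperm.trans hperm.symm)
  · intro a b ha hb h1 h2
    have ha' : a ∈ xs := hLperm.mem_iff.mp ha
    have hb' : b ∈ xs := hperm.mem_iff.mp hb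
    have h1' := h1; have h2' := h2
    simp [lexB] at h1' h2'
    exact hinj a ha' b hb' (by omega) (by omega)
  · exact foldl_insertBy_lexB_pairwise k1 k2 xs [] (by simp)
  · exact hp.imp (fun h => lexB_asymm _ _ h)

-- characterisation of A's dedup loop: the pairs' values are the ordered dedup
-- and the indices are strictly increasing
theorem foldA_char (values : List String) :
    ∀ (s : Int) (acc : List (String × Int)), (∀ p ∈ acc, p.2 < s) →
    acc.Pairwise (fun a b => a.2 < b.2) →
    ((PySem.List.enumerate values s).foldl stepA (acc, acc.map Prod.fst)).1.map Prod.fst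
      = values.foldl PySem.Set.add (acc.map Prod.fst)
    ∧ ((PySem.List.enumerate values s).foldl stepA (acc, acc.map Prod.fst)).1.Pairwise
        (fun a b => a.2 < b.2) := by
  induction values with
  | nil =>
    intro s acc _ hpw
    exact ⟨by simp [PySem.List.enumerate], by simpa [PySem.List.enumerate] using hpw⟩
  | cons v vs ih =>
    intro s acc hlt hpw
    rw [PySem.List.enumerate_cons, List.foldl_cons, List.foldl_cons]
    cases hc : PySem.Set.contains (acc.map Prod.fst) v with
    | true =>
      rw [stepA_mem hc, setAdd_mem hc]
      exact ih (s + 1) acc (fun p hp => by have := hlt p hp; omega) hpw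
    | false =>
      rw [stepA_new hc, setAdd_new (s := s) hc]
      have hlt' : ∀ p ∈ acc ++ [(v, s)], p.2 < s + 1 := by
        intro p hp
        rcases List.mem_append.mp hp with h | h
        · have := hlt p h; omega
        · simp at h; subst h; omega
      have hpw' : (acc ++ [(v, s)]).Pairwise (fun a b => a.2 < b.2) := by
        refine List.pairwise_append.mpr ⟨hpw, by simp, ?_⟩
        intro a ha b hb
        simp at hb; subst hb
        exact hlt a ha
      exact ih (s + 1) (acc ++ [(v, s)]) hlt' hpw'

-- every element falls in exactly one bucket: concatenating the buckets over
-- distinct, complete keys is a permutation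
theorem flatMap_filter_perm {α : Type} (key : α → Int) :
    ∀ (ks : List Int) (P : List α), ks.Nodup → (∀ p ∈ P, key p ∈ ks) →
    (ks.flatMap (fun r => P.filter (fun p => key p == r))).Perm P := by
  intro ks
  induction ks with
  | nil =>
    intro P _ hall
    cases P with
    | nil => simp
    | cons p t => exact absurd (hall p (by simp)) (by simp)
  | cons r ks' ih =>
    intro P hnd hall
    rw [List.flatMap_cons]
    have hnd' : ks'.Nodup := (List.nodup_cons.mp hnd).2
    have hrk : r ∉ ks' := (List.nodup_cons.mp hnd).1
    have hbucket : ∀ r' ∈ ks', P.filter (fun p => key p == r')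
        = (P.filter (fun p => !(key p == r))).filter (fun p => key p == r') := by
      intro r' hr'
      rw [List.filter_filter]
      apply List.filter_congr
      intro p _
      by_cases h : key p = r'
      · have : r' ≠ r := by rintro rfl; exact hrk hr'
        simp [h, this]
      · simp [h]
    have hmapeq : ks'.flatMap (fun r' => P.filter (fun p => key p == r'))
        = ks'.flatMap (fun r' => (P.filter (fun p => !(key p == r))).filter
            (fun p => key p == r')) := by
      simp only [List.flatMap]
      exact congrArg List.flatten (List.map_congr_left hbucket)
    have hallQ : ∀ p ∈ P.filter (fun p => !(key p == r)), key p ∈ ks' := by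
      intro p hp
      have hpP : p ∈ P := List.mem_of_mem_filter hp
      have hne : ¬(key p = r) := by
        have := List.of_mem_filter hp; simpa using this
      rcases List.mem_cons.mp (hall p hpP) with h | h
      · exact absurd h hne
      · exact h
    have hQperm := ih (P.filter (fun p => !(key p == r))) hnd' hallQ
    rw [hmapeq]
    exact (hQperm.append_left _).trans (List.filter_append_perm (fun p => key p == r) P)

-- the heart of the equivalence: sorting the dedup pairs by (rank, index) and
-- mapping to values equals concatenating the rank buckets in increasing rank order
theorem main_else {P : List (String × Int)} (rank : String → Int)
    (hPsnd : P.Pairwise (fun a b => a.2 < b.2)) :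
    (PySem.List.sorted2 P (fun it => rank it.1) (fun it => it.2)).map (fun it => it.1)
      = (PySem.List.sorted
            ((P.map Prod.fst).foldl
              (fun b v => b.modify (rank v) [] (fun cur => cur ++ [v]))
              PySem.Dict.empty).keys (fun r => r)).foldl
          (fun out r => out ++
            ((P.map Prod.fst).foldl
              (fun b v => b.modify (rank v) [] (fun cur => cur ++ [v]))
              PySem.Dict.empty).getD r []) [] := by
  set V := P.map Prod.fst with hV
  set B := V.foldl (fun b v => b.modify (rank v) [] (fun cur => cur ++ [v]))
      PySem.Dict.empty with hB
  have hkeys : B.keys = PySem.Set.ofList (V.map rank) := by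
    rw [hB, PySem.Dict.keys_foldl_modify_key V rank [] (fun _ v => fun cur => cur ++ [v])
      PySem.Dict.empty]
    rw [PySem.Dict.keys_empty, PySem.Set.update_nil_left]
  have hgetD : ∀ c, B.getD c [] = V.filter (fun v => rank v == c) := by
    intro c
    have h1 : B = (V.map (fun v => (rank v, v))).foldl
        (fun b p => b.modify p.1 [] (fun cur => cur ++ [p.2])) PySem.Dict.empty := by
      rw [List.foldl_map]
    rw [h1, PySem.Dict.getD_foldl_modify_append]
    simp [List.filter_map, List.map_map, Function.comp_def]
  set SR := PySem.List.sorted B.keys (fun r => r) with hSR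
  have hSRlt : SR.Pairwise (· < ·) := by
    rw [hSR, hkeys]; exact PySem.List.sorted_ofList_pairwise_lt _
  have hSRnd : SR.Nodup := hSRlt.imp (fun h => ne_of_lt h)
  have hSRmem : ∀ p ∈ P, rank p.1 ∈ SR := by
    intro p hp
    rw [hSR, PySem.List.mem_sorted, hkeys, PySem.Set.mem_ofList]
    exact List.mem_map_of_mem (List.mem_map_of_mem hp)
  have hR : SR.foldl (fun out r => out ++ B.getD r []) [] = SR.flatMap (fun r => B.getD r []) := by
    simpa using PySem.List.foldl_append_eq_flatMap (fun r => B.getD r []) SR []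
  have hsorted : PySem.List.sorted2 P (fun it => rank it.1) (fun it => it.2)
      = SR.flatMap (fun r => P.filter (fun p => rank p.1 == r)) := by
    apply sorted2_eq_of_perm
    · intro a ha b hb _h1 h2
      have hnd : (P.map Prod.snd).Nodup := by
        have hplt : (P.map Prod.snd).Pairwise (· < ·) := List.pairwise_map.mpr hPsnd
        exact hplt.imp (fun h => ne_of_lt h)
      exact List.inj_on_of_nodup_map hnd ha hb h2
    · exact flatMap_filter_perm (fun p => rank p.1) SR P hSRnd hSRmem
    · refine List.pairwise_flatMap.mpr ⟨?_, ?_⟩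
      · intro r _hr
        refine (hPsnd.filter _).imp_of_mem ?_
        intro a b ha hb hab
        have ha' : rank a.1 = r := by simpa using List.of_mem_filter ha
        have hb' : rank b.1 = r := by simpa using List.of_mem_filter hb
        simp [lexB, ha', hb']
        omega
      · refine hSRlt.imp_of_mem ?_
        intro r1 r2 _ _ h12 x hx y hy
        have hx' : rank x.1 = r1 := by simpa using List.of_mem_filter hx
        have hy' : rank y.1 = r2 := by simpa using List.of_mem_filter hy
        simp [lexB, hx', hy']
        omega
  have hball : ∀ r, (P.filter (fun p => rank p.1 == r)).map (fun it => it.1) = B.getD r [] := by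
    intro r
    rw [hgetD r, hV, List.filter_map]
    rfl
  calc (PySem.List.sorted2 P (fun it => rank it.1) (fun it => it.2)).map (fun it => it.1)
      = (SR.flatMap (fun r => P.filter (fun p => rank p.1 == r))).map (fun it => it.1) := by
        rw [hsorted]
    _ = SR.flatMap (fun r => (P.filter (fun p => rank p.1 == r)).map (fun it => it.1)) :=
        List.map_flatMap
    _ = SR.flatMap (fun r => B.getD r []) := by
        simp only [List.flatMap]
        exact congrArg List.flatten (List.map_congr_left (fun r _ => hball r))
    _ = SR.foldl (fun out r => out ++ B.getD r []) [] := hR.symm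

-- ===== VERDICT (by name: the statement is the Claim_ definition above) =====
theorem order_values_py_spec : Claim_equal_order_values_py := by
  intro values order_map _hdom
  unfold Spec_order_values_py order_values_py order_values_py_alt
  dsimp only
  have H := foldA_char values 0 [] (by simp) (by simp)
  have hPfst : (List.foldl
      (fun (st : List (String × Int) × PySem.Set String) p =>
        if PySem.Set.contains st.2 p.2 then st
        else (st.1 ++ [(p.2, p.1)], PySem.Set.add st.2 p.2))
      ([], PySem.Set.empty) (PySem.List.enumerate values)).1.map Prod.fst
      = List.foldl PySem.Set.add PySem.Set.empty values := H.1
  have hPsnd : (List.foldl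
      (fun (st : List (String × Int) × PySem.Set String) p =>
        if PySem.Set.contains st.2 p.2 then st
        else (st.1 ++ [(p.2, p.1)], PySem.Set.add st.2 p.2))
      ([], PySem.Set.empty) (PySem.List.enumerate values)).1.Pairwise
      (fun a b => a.2 < b.2) := H.2
  by_cases hEmpty : order_map.isEmpty = true
  · rw [if_pos hEmpty, if_pos hEmpty]
    exact hPfst
  · rw [if_neg hEmpty, if_neg hEmpty, ← hPfst]
    exact main_else
      (fun v => (PySem.Dict.ofList order_map).getD v ((PySem.Dict.ofList order_map).size : Int))
      hPsnd
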